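-- pv_equiv track=rewrite | github.com/rimaz04/Intertwined_lattice_sem_project | topology_multi_edge.py | all_unique_sequences
-- ===== SOURCE A (Python) =====
-- from itertools import combinations, permutations, product
--
-- def all_unique_sequences(elements, min_length=2, max_length=None):
--     """Return unique ordered subsets, with reverse paths treated as identical."""
--     elements = list(elements)
--     sequences = set()
--     if max_length is None:
--         max_length = len(elements)
--
--     for subset_size in range(min_length, max_length + 1):
--         for subset in combinations(elements, subset_size):
--             for perm in permutations(subset):
--                 sequences.add(min(perm, perm[::-1]))
--
--     return sorted(sequences, key=lambda x: (len(x), x))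
-- ===== SOURCE B (Python) =====
-- def all_unique_sequences(elements, min_length=2, max_length=None):
--     """Return unique ordered subsets, with reverse paths treated as identical."""
--     elements = list(elements)
--     if max_length is None:
--         max_length = len(elements)
--     found = set()
--
--     def extend(path, remaining):
--         k = len(path)
--         if min_length <= k <= max_length:
--             r = path[::-1]
--             found.add(tuple(path if path <= r else r))
--         if k >= max_length:
--             return
--         for i in range(len(remaining)):
--             extend(path + [remaining[i]], remaining[:i] + remaining[i + 1:])
--
--     extend([], elements)
--     return sorted(found, key=lambda x: (len(x), x))
-- ===== Notes on version B (the rewrite author's own statement) =====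
-- stated objective: alternative
-- what changed: Replaces the itertools combinations-then-permutations double enumeration with a recursive backtracking DFS that extends a path one element at a time from the remaining pool, canonicalizing (path vs its reverse) at each node whose length is in range and pruning at max_length; pure-Python recursion is constant-factor slower than itertools.
import Mathlib
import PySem

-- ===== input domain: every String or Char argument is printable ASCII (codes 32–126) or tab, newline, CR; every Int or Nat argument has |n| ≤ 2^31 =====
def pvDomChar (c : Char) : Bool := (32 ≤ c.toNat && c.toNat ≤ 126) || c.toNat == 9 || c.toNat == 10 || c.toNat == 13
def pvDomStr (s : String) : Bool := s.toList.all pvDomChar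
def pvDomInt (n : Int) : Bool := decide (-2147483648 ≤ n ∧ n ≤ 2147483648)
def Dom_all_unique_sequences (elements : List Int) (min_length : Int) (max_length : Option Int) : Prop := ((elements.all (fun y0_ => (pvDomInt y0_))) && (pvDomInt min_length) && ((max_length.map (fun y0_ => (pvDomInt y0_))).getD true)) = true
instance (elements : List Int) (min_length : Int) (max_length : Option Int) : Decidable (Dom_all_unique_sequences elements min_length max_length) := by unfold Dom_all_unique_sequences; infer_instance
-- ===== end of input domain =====

-- B replaces A's itertools combinations-then-permutations double enumeration by a recursive
-- backtracking DFS over (path, remaining), canonicalizing path against its reverse at each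
-- in-range node and pruning at max_length (objective: alternative; same cost).

-- ===== PORT A =====
-- min(perm, perm[::-1]): Python's min of two equal-length int tuples (lexicographic compare;
-- Lean's LinearOrder (List Int) '<' is the same lexicographic order); perm[::-1] via slice?
-- (step -1 never raises, .getD [] is never taken).
def pyMinRev (p : List Int) : List Int :=
  let r := (PySem.List.slice? p none none (-1)).getD []
  if r < p then r else p

-- literal transliteration of A.  combinations takes a Nat size; Python raises ValueError on a
-- negative subset_size, so Pre_ excludes ranges containing negatives and '.toNat' is the total stand-in.
def all_unique_sequences (elements : List Int) (min_length : Int) (max_length : Option Int) : List (List Int) :=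
  let maxL : Int := match max_length with
    | none => PySem.List.len elements
    | some m => m
  let sequences : PySem.Set (List Int) :=
    (PySem.List.pyRange min_length (maxL + 1) 1).foldl (fun seqs subset_size =>
      (PySem.List.combinations elements subset_size.toNat).foldl (fun seqs subset =>
        (PySem.List.permutations subset subset.length).foldl (fun seqs perm =>
          PySem.Set.add seqs (pyMinRev perm)) seqs) seqs)
      PySem.Set.empty
  PySem.List.sorted2 sequences (fun x => PySem.List.len x) (fun x => x)

-- ===== PORT B =====
-- 'path if path <= r else r' with r = path[::-1] (Source B's canonical form)
def canonRev (p : List Int) : List Int :=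
  let r := (PySem.List.slice? p none none (-1)).getD []
  if p ≤ r then p else r

-- Source B's recursive 'extend(path, remaining)'.  Python needs no fuel; here fuel is the standard
-- totality crutch, called with fuel = remaining.length so the 0-branch is reached only with
-- remaining = [], where Python's loop body also never runs.  remaining[:i] + remaining[i+1:]
-- is the two slices, the loop over i,x is enumerate.
-- the 'if min_length <= k <= max_length: found.add(...)' block of Source B's extend
def addInRange (minL maxL : Int) (path : List Int) (found : PySem.Set (List Int)) : PySem.Set (List Int) :=
  if minL ≤ PySem.List.len path ∧ PySem.List.len path ≤ maxL
  then PySem.Set.add found (canonRev path) else found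

def extendSeqs (minL maxL : Int) (fuel : Nat) (path remaining : List Int)
    (found : PySem.Set (List Int)) : PySem.Set (List Int) :=
  if maxL ≤ PySem.List.len path then addInRange minL maxL path found
  else match fuel with
    | 0 => addInRange minL maxL path found
    | fuel' + 1 =>
      (PySem.List.enumerate remaining 0).foldl (fun fd p =>
        extendSeqs minL maxL fuel' (path ++ [p.2])
          (PySem.List.slice remaining none (some p.1) ++
           PySem.List.slice remaining (some (p.1 + 1)) none) fd)
        (addInRange minL maxL path found)

-- literal transliteration of B: DFS from the empty path over the whole pool, then sort.
def all_unique_sequences_alt (elements : List Int) (min_length : Int) (max_length : Option Int) : List (List Int) :=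
  let maxL : Int := match max_length with
    | none => PySem.List.len elements
    | some m => m
  let found : PySem.Set (List Int) :=
    extendSeqs min_length maxL elements.length [] elements PySem.Set.empty
  PySem.List.sorted2 found (fun x => PySem.List.len x) (fun x => x)

-- ===== PRECONDITION & SPEC =====
-- Pre_ excludes exactly the inputs where the Python A raises ValueError ('r must be non-negative'):
-- a nonempty size range range(min_length, max+1) containing a negative size.
def Pre_all_unique_sequences (elements : List Int) (min_length : Int) (max_length : Option Int) : Prop :=
  0 ≤ min_length ∨ (match max_length with
    | none => PySem.List.len elements
    | some m => m) + 1 ≤ min_length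
instance (elements : List Int) (min_length : Int) (max_length : Option Int) : Decidable (Pre_all_unique_sequences elements min_length max_length) := by unfold Pre_all_unique_sequences; infer_instance

def pvWitness_all_unique_sequences : List Int × Int × Option Int := ([1, 2, 3], 2, none)

def Spec_all_unique_sequences (elements : List Int) (min_length : Int) (max_length : Option Int) (out : List (List Int)) : Prop := out = all_unique_sequences_alt elements min_length max_length
instance (elements : List Int) (min_length : Int) (max_length : Option Int) (out : List (List Int)) : Decidable (Spec_all_unique_sequences elements min_length max_length out) := by unfold Spec_all_unique_sequences; infer_instance

-- ===== CLAIM (what is proved, stated in full; the proofs are below) =====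
def Claim_equal_all_unique_sequences : Prop := ∀ (elements : List Int) (min_length : Int) (max_length : Option Int), Dom_all_unique_sequences elements min_length max_length → Pre_all_unique_sequences elements min_length max_length → Spec_all_unique_sequences elements min_length max_length (all_unique_sequences elements min_length max_length)

-- ===== LEMMAS AND PROOFS =====

theorem permutations_succ (xs : List Int) (r : Nat) :
    PySem.List.permutations xs (r+1) =
      (List.range xs.length).flatMap (fun i => match xs[i]? with
        | none => []
        | some x => (PySem.List.permutations (xs.eraseIdx i) r).map (fun p => x :: p)) := by
  rw [PySem.List.permutations]
  congr 1
  funext i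
  rcases xs[i]? with _ | x <;> rfl

-- itertools.permutations(xs, r) enumerates exactly the length-r subpermutations of xs
theorem mem_permutations (r : Nat) (xs p : List Int) :
    p ∈ PySem.List.permutations xs r ↔ p.Subperm xs ∧ p.length = r := by
  induction r generalizing xs p with
  | zero =>
    constructor
    · rintro h
      simp only [PySem.List.permutations, List.mem_singleton] at h
      subst h; exact ⟨List.nil_subperm, rfl⟩
    · rintro ⟨_, hl⟩
      rw [List.length_eq_zero_iff] at hl; subst hl
      simp [PySem.List.permutations]
  | succ r ih =>
    rw [permutations_succ]
    simp only [List.mem_flatMap, List.mem_range]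
    constructor
    · rintro ⟨i, hi, hp⟩
      rw [List.getElem?_eq_getElem hi] at hp
      simp only [List.mem_map] at hp
      obtain ⟨q, hq, rfl⟩ := hp
      obtain ⟨hsub, hlen⟩ := (ih _ _).mp hq
      refine ⟨?_, by simp [hlen]⟩
      exact ((List.subperm_cons _).mpr hsub).trans
        (List.getElem_cons_eraseIdx_perm hi).subperm
    · rintro ⟨hsub, hlen⟩
      match p with
      | x :: q =>
        have hx : x ∈ xs := hsub.subset (List.mem_cons_self)
        have hi : xs.idxOf x < xs.length := List.idxOf_lt_length_of_mem hx
        refine ⟨xs.idxOf x, hi, ?_⟩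
        rw [List.getElem?_eq_getElem hi, List.getElem_idxOf hi]
        simp only [List.mem_map]
        refine ⟨q, (ih _ _).mpr ⟨?_, by simpa using hlen⟩, rfl⟩
        rw [← List.erase_eq_eraseIdx_of_idxOf (l := xs) (a := x) rfl]
        obtain ⟨s, hs, hsl⟩ := hsub
        refine ⟨s.erase x, ?_, hsl.erase x⟩
        simpa using hs.erase x

-- full-length permutations of s are exactly the rearrangements of s
theorem mem_permutations_self (s p : List Int) :
    p ∈ PySem.List.permutations s s.length ↔ p.Perm s := by
  rw [mem_permutations]
  constructor
  · rintro ⟨hsub, hlen⟩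
    exact hsub.perm_of_length_le (by omega)
  · intro h
    exact ⟨⟨s, h.symm, List.Sublist.refl s⟩, h.length_eq⟩

-- A's inner two loops over (combinations, full permutations) generate exactly the canonical
-- forms of the k-subpermutations of elements
theorem gen_iff (el : List Int) (k : Nat) (x : List Int) :
    (∃ s ∈ PySem.List.combinations el k, ∃ p ∈ PySem.List.permutations s s.length, x = pyMinRev p)
      ↔ ∃ p : List Int, p.Subperm el ∧ p.length = k ∧ x = pyMinRev p := by
  constructor
  · rintro ⟨s, hs, p, hp, rfl⟩
    obtain ⟨hsub, hslen⟩ := (PySem.List.mem_combinations_iff el k s).mp hs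
    have hperm := (mem_permutations_self s p).mp hp
    exact ⟨p, ⟨s, hperm.symm, hsub⟩, by rw [hperm.length_eq, hslen], rfl⟩
  · rintro ⟨p, ⟨s, hsp, hsl⟩, hlen, rfl⟩
    refine ⟨s, (PySem.List.mem_combinations_iff el k s).mpr ⟨hsl, by rw [← hlen, hsp.length_eq]⟩,
      p, (mem_permutations_self s p).mpr hsp.symm, rfl⟩

-- membership through a fold whose step adds members pointwise (member-restricted form)
theorem mem_foldl_gen {β : Type} (l : List β) (g : PySem.Set (List Int) → β → PySem.Set (List Int))
    (P : β → List Int → Prop)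
    (hg : ∀ acc b, b ∈ l → ∀ y, y ∈ g acc b ↔ y ∈ acc ∨ P b y) :
    ∀ (init : PySem.Set (List Int)) (y : List Int),
      y ∈ l.foldl g init ↔ y ∈ init ∨ ∃ b ∈ l, P b y := by
  induction l with
  | nil => simp
  | cons b bs ih =>
    intro init y
    simp only [List.foldl_cons, List.mem_cons]
    rw [ih (fun acc b' hb' y => hg acc b' (List.mem_cons_of_mem _ hb') y) _ y,
        hg _ _ (List.mem_cons_self) y]
    constructor
    · rintro ((h | h) | ⟨b', hb', h⟩)
      · exact Or.inl h
      · exact Or.inr ⟨b, Or.inl rfl, h⟩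
      · exact Or.inr ⟨b', Or.inr hb', h⟩
    · rintro (h | ⟨b', (rfl | hb'), h⟩)
      · exact Or.inl (Or.inl h)
      · exact Or.inl (Or.inr h)
      · exact Or.inr ⟨b', hb', h⟩

theorem nodup_foldl_gen {β : Type} (l : List β) (g : PySem.Set (List Int) → β → PySem.Set (List Int))
    (hg : ∀ acc b, List.Nodup acc → List.Nodup (g acc b)) :
    ∀ (init : PySem.Set (List Int)), List.Nodup init → List.Nodup (l.foldl g init) := by
  induction l with
  | nil => intro init h; simpa using h
  | cons b bs ih => intro init h; exact ih _ (hg _ _ h)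

-- the two canonicalisations agree (Python's min(p, rev) = p if p <= rev else rev)
theorem canonRev_eq (p : List Int) : canonRev p = pyMinRev p := by
  unfold canonRev pyMinRev
  rcases lt_trichotomy ((PySem.List.slice? p none none (-1)).getD []) p with h | h | h
  · simp [h, not_le_of_gt h]
  · simp [h]
  · simp [not_lt_of_gt h, le_of_lt h]

-- the two slices in B's recursive call are eraseIdx
theorem slices_eq_eraseIdx (xs : List Int) (i : Nat) :
    PySem.List.slice xs none (some (i : Int)) ++
      PySem.List.slice xs (some ((i : Int) + 1)) none = xs.eraseIdx i := by
  have h1 := PySem.List.slice_to_natCast (xs := xs) (b := i)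
  have h2 := PySem.List.slice_from_natCast (xs := xs) (a := i + 1)
  push_cast at h2
  rw [h1, h2, List.eraseIdx_eq_take_drop_succ]

-- membership in Source B's in-range add block
theorem mem_addInRange (minL maxL : Int) (path : List Int) (found : PySem.Set (List Int))
    (y : List Int) :
    y ∈ addInRange minL maxL path found ↔
      y ∈ found ∨ (minL ≤ (path.length : Int) ∧ (path.length : Int) ≤ maxL ∧
        y = canonRev path) := by
  unfold addInRange
  simp only [PySem.List.len_eq]
  split_ifs with h1
  · rw [PySem.Set.mem_add]
    constructor
    · rintro (h | h)
      · exact Or.inl h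
      · exact Or.inr ⟨h1.1, h1.2, h⟩
    · rintro (h | ⟨_, _, h⟩)
      · exact Or.inl h
      · exact Or.inr h
  · constructor
    · exact Or.inl
    · rintro (h | ⟨ha, hb, _⟩)
      · exact h
      · exact absurd ⟨ha, hb⟩ h1

theorem nodup_addInRange (minL maxL : Int) (path : List Int) (found : PySem.Set (List Int))
    (h : List.Nodup found) : List.Nodup (addInRange minL maxL path found) := by
  unfold addInRange
  split_ifs
  · exact PySem.Set.nodup_add _ _ h
  · exact h

-- membership characterization of B's DFS: the canonical forms of all extensions of path by a
-- subpermutation of remaining whose total length lies in [minL, maxL]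
theorem mem_extendSeqs (minL maxL : Int) :
    ∀ (fuel : Nat) (path remaining : List Int), remaining.length = fuel →
      ∀ (found : PySem.Set (List Int)) (y : List Int),
        y ∈ extendSeqs minL maxL fuel path remaining found ↔
          y ∈ found ∨ ∃ q : List Int, q.Subperm remaining ∧
            minL ≤ (path.length : Int) + q.length ∧ (path.length : Int) + q.length ≤ maxL ∧
            y = canonRev (path ++ q) := by
  intro fuel
  induction fuel with
  | zero =>
    intro path remaining hrem found y
    rw [List.length_eq_zero_iff] at hrem; subst hrem
    rw [extendSeqs]
    simp only [PySem.List.len_eq]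
    rw [ite_self, mem_addInRange]
    constructor
    · rintro (h | ⟨h1, h2, h3⟩)
      · exact Or.inl h
      · exact Or.inr ⟨[], List.nil_subperm, by simpa using h1, by simpa using h2, by simpa using h3⟩
    · rintro (h | ⟨q, hq, hmin, hmax, rfl⟩)
      · exact Or.inl h
      · have hq0 : q = [] :=
          List.length_eq_zero_iff.mp (Nat.le_zero.mp hq.length_le)
        subst hq0
        exact Or.inr ⟨by simpa using hmin, by simpa using hmax, by simp⟩
  | succ fuel ih =>
    intro path remaining hrem found y
    rw [extendSeqs]
    simp only [PySem.List.len_eq]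
    by_cases hstop : maxL ≤ (path.length : Int)
    · rw [if_pos hstop, mem_addInRange]
      constructor
      · rintro (h | ⟨h1, h2, h3⟩)
        · exact Or.inl h
        · exact Or.inr ⟨[], List.nil_subperm, by simpa using h1, by simpa using h2, by simpa using h3⟩
      · rintro (h | ⟨q, hq, hmin, hmax, rfl⟩)
        · exact Or.inl h
        · have hq0 : q = [] := by
            have h1 := hq.length_le
            have h2 : q.length = 0 := by omega
            exact List.length_eq_zero_iff.mp h2
          subst hq0
          exact Or.inr ⟨by simpa using hmin, by simpa using hmax, by simp⟩
    · rw [if_neg hstop]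
      -- rewrite the fold's step to use eraseIdx, then characterize
      have hcongr := PySem.List.foldl_congr_mem
          (l := PySem.List.enumerate remaining 0)
          (init := addInRange minL maxL path found)
          (f := fun fd (p : Int × Int) =>
            extendSeqs minL maxL fuel (path ++ [p.2])
              (PySem.List.slice remaining none (some p.1) ++
               PySem.List.slice remaining (some (p.1 + 1)) none) fd)
          (g := fun fd (p : Int × Int) =>
            extendSeqs minL maxL fuel (path ++ [p.2]) (remaining.eraseIdx p.1.toNat) fd)
          (by
            intro acc p hp
            obtain ⟨k, hk, rfl⟩ := (PySem.List.mem_enumerate_iff _ _ _).mp hp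
            simp only [zero_add, Int.toNat_natCast, slices_eq_eraseIdx])
      rw [hcongr]
      rw [mem_foldl_gen (PySem.List.enumerate remaining 0)
          (fun fd (p : Int × Int) =>
            extendSeqs minL maxL fuel (path ++ [p.2]) (remaining.eraseIdx p.1.toNat) fd)
          (fun p y => ∃ q' : List Int,
            q'.Subperm (remaining.eraseIdx p.1.toNat) ∧
            minL ≤ ((path ++ [p.2]).length : Int) + q'.length ∧
            ((path ++ [p.2]).length : Int) + q'.length ≤ maxL ∧
            y = canonRev ((path ++ [p.2]) ++ q'))
          (by
            intro acc p hp y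
            obtain ⟨k, hk, rfl⟩ := (PySem.List.mem_enumerate_iff _ _ _).mp hp
            apply ih
            simp only [zero_add, Int.toNat_natCast]
            rw [List.length_eraseIdx_of_lt hk, hrem]
            omega) _ y]
      rw [mem_addInRange]
      constructor
      · rintro ((h | ⟨h1, h2, h3⟩) | ⟨p, hp, q', hq', hmin, hmax, rfl⟩)
        · exact Or.inl h
        · exact Or.inr ⟨[], List.nil_subperm, by simpa using h1, by simpa using h2, by simpa using h3⟩
        · obtain ⟨k, hk, rfl⟩ := (PySem.List.mem_enumerate_iff _ _ _).mp hp
          simp only [zero_add, Int.toNat_natCast] at hq' ⊢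
          refine Or.inr ⟨remaining[k] :: q', ?_, ?_, ?_, ?_⟩
          · exact ((List.subperm_cons _).mpr hq').trans
              (List.getElem_cons_eraseIdx_perm hk).subperm
          · simp only [List.length_append, List.length_singleton] at hmin
            simp only [List.length_cons]
            push_cast at hmin ⊢
            omega
          · simp only [List.length_append, List.length_singleton] at hmax
            simp only [List.length_cons]
            push_cast at hmax ⊢
            omega
          · simp
      · rintro (h | ⟨q, hq, hmin, hmax, rfl⟩)
        · exact Or.inl (Or.inl h)
        · match q with
          | [] =>
            exact Or.inl (Or.inr ⟨by simpa using hmin, by simpa using hmax, by simp⟩)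
          | x :: q' =>
            have hx : x ∈ remaining := hq.subset (List.mem_cons_self)
            have hi : remaining.idxOf x < remaining.length := List.idxOf_lt_length_of_mem hx
            have hq' : q'.Subperm (remaining.eraseIdx (remaining.idxOf x)) := by
              rw [← List.erase_eq_eraseIdx_of_idxOf (l := remaining) (a := x) rfl]
              obtain ⟨s, hs, hsl⟩ := hq
              refine ⟨s.erase x, ?_, hsl.erase x⟩
              simpa using hs.erase x
            refine Or.inr ⟨((remaining.idxOf x : Int), x), ?_, q', ?_, ?_, ?_, ?_⟩
            · rw [PySem.List.mem_enumerate_iff]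
              exact ⟨remaining.idxOf x, hi, by rw [List.getElem_idxOf hi]; simp⟩
            · simpa using hq'
            · simp only [List.length_append, List.length_singleton]
              simp only [List.length_cons] at hmin
              push_cast at hmin ⊢
              omega
            · simp only [List.length_append, List.length_singleton]
              simp only [List.length_cons] at hmax
              push_cast at hmax ⊢
              omega
            · simp

-- B's DFS preserves distinctness of the accumulator set
theorem nodup_extendSeqs (minL maxL : Int) :
    ∀ (fuel : Nat) (path remaining : List Int) (found : PySem.Set (List Int)),
      List.Nodup found → List.Nodup (extendSeqs minL maxL fuel path remaining found) := by
  intro fuel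
  induction fuel with
  | zero =>
    intro path remaining found h
    rw [extendSeqs]
    split_ifs <;> exact nodup_addInRange _ _ _ _ h
  | succ fuel ih =>
    intro path remaining found h
    rw [extendSeqs]
    split_ifs with hstop
    · exact nodup_addInRange _ _ _ _ h
    · exact nodup_foldl_gen _ _ (fun acc b hacc => ih _ _ _ hacc) _
        (nodup_addInRange _ _ _ _ h)

-- sorted2 with keys (len x, x) is sorted by the lexicographic pair key
theorem sorted2_eq_sorted_lex (xs : List (List Int)) :
    PySem.List.sorted2 xs (fun x => PySem.List.len x) (fun x => x) false
      = PySem.List.sorted xs (fun x => toLex (PySem.List.len x, x)) false := by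
  unfold PySem.List.sorted2 PySem.List.sorted
  simp only [if_neg (by decide : ¬ (false = true))]
  congr 1
  funext acc x
  congr 1
  funext a b
  simp only [Prod.Lex.lt_iff]
  rcases lt_trichotomy a.length b.length with h | h | h
  · simp [h]
  · simp [h]
  · simp [not_lt_of_gt h, ne_of_gt h]
    exact fun h3 => absurd h3 (by omega)

-- A's triple-loop fold characterized
theorem mem_A_set (elements : List Int) (min_length maxL : Int) (y : List Int) :
    (y ∈ (PySem.List.pyRange min_length (maxL + 1) 1).foldl (fun seqs subset_size =>
        (PySem.List.combinations elements subset_size.toNat).foldl (fun seqs subset =>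
          (PySem.List.permutations subset subset.length).foldl (fun seqs perm =>
            PySem.Set.add seqs (pyMinRev perm)) seqs) seqs)
        PySem.Set.empty)
      ↔ ∃ k ∈ PySem.List.pyRange min_length (maxL + 1) 1,
          ∃ p : List Int, p.Subperm elements ∧ p.length = k.toNat ∧ y = pyMinRev p := by
  rw [mem_foldl_gen _ _ (fun k y => ∃ s ∈ PySem.List.combinations elements k.toNat,
        ∃ p ∈ PySem.List.permutations s s.length, y = pyMinRev p)]
  · simp only [PySem.Set.empty]
    constructor
    · rintro (h | ⟨k, hk, h⟩)
      · simp at h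
      · obtain ⟨p, h1, h2, h3⟩ := (gen_iff elements k.toNat y).mp h
        exact ⟨k, hk, p, h1, h2, h3⟩
    · rintro ⟨k, hk, p, h1, h2, h3⟩
      exact Or.inr ⟨k, hk, (gen_iff elements k.toNat _).mpr ⟨p, h1, h2, h3⟩⟩
  · intro acc k _ y
    rw [mem_foldl_gen _ _ (fun s y => ∃ p ∈ PySem.List.permutations s s.length, y = pyMinRev p)]
    intro acc s _ y
    exact PySem.Set.mem_foldl_add _ _ _ _

theorem nodup_A_set (elements : List Int) (min_length maxL : Int) :
    List.Nodup ((PySem.List.pyRange min_length (maxL + 1) 1).foldl (fun seqs subset_size =>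
        (PySem.List.combinations elements subset_size.toNat).foldl (fun seqs subset =>
          (PySem.List.permutations subset subset.length).foldl (fun seqs perm =>
            PySem.Set.add seqs (pyMinRev perm)) seqs) seqs)
        PySem.Set.empty) := by
  apply nodup_foldl_gen
  · intro acc k h
    apply nodup_foldl_gen
    · intro acc s h
      apply nodup_foldl_gen
      · intro acc p h
        exact PySem.Set.nodup_add _ _ h
      · exact h
    · exact h
  · exact List.nodup_nil

-- under Pre_, the two generated sets have the same members
theorem sets_mem_iff (elements : List Int) (min_length maxL : Int)
    (hpre : 0 ≤ min_length ∨ maxL + 1 ≤ min_length) (y : List Int) :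
    (y ∈ (PySem.List.pyRange min_length (maxL + 1) 1).foldl (fun seqs subset_size =>
        (PySem.List.combinations elements subset_size.toNat).foldl (fun seqs subset =>
          (PySem.List.permutations subset subset.length).foldl (fun seqs perm =>
            PySem.Set.add seqs (pyMinRev perm)) seqs) seqs)
        PySem.Set.empty)
      ↔ y ∈ extendSeqs min_length maxL elements.length [] elements PySem.Set.empty := by
  rw [mem_A_set, mem_extendSeqs min_length maxL elements.length [] elements rfl]
  simp only [PySem.Set.empty, List.not_mem_nil, false_or, List.length_nil, Nat.cast_zero,
    zero_add, List.nil_append, PySem.List.mem_pyRange_one]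
  constructor
  · rintro ⟨k, ⟨hk1, hk2⟩, p, hsub, hlen, rfl⟩
    have hk0 : 0 ≤ k := by
      rcases hpre with h | h
      · omega
      · omega
    refine ⟨p, hsub, ?_, ?_, (canonRev_eq p).symm⟩
    · rw [hlen]; omega
    · rw [hlen]; omega
  · rintro ⟨q, hsub, hmin, hmax, rfl⟩
    exact ⟨(q.length : Int), ⟨hmin, by omega⟩, q, hsub, by simp, (canonRev_eq q)⟩

-- ===== VERDICT (by name: the statement is the Claim_ definition above) =====
theorem all_unique_sequences_spec : Claim_equal_all_unique_sequences := by
  intro elements min_length max_length _ hpre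
  unfold Spec_all_unique_sequences all_unique_sequences all_unique_sequences_alt
  rw [sorted2_eq_sorted_lex, sorted2_eq_sorted_lex]
  apply PySem.List.sorted_eq_sorted_of_perm
  · intro a b hab
    simpa using congrArg (fun z => (ofLex z).2) hab
  · apply (List.perm_ext_iff_of_nodup (nodup_A_set elements min_length _)
      (nodup_extendSeqs _ _ _ _ _ _ List.nodup_nil)).mpr
    intro y
    apply sets_mem_iff
    unfold Pre_all_unique_sequences at hpre
    rcases hpre with h | h
    · exact Or.inl h
    · right
      rcases max_length with _ | m <;> simpa using h
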